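-- pv_equiv track=rewrite | github.com/emanuxd11/FP-feup | MT1_prac/4.py | primes_difference
-- ===== SOURCE A (Python) =====
-- def is_prime(n):
--     for i in range(2, n):
--         if n % i == 0:
--             return False
--     return True
--
-- def primes_difference(n):
--     if n <= 3:
--         return
--
--     firstPrime = n + 1
--     while not is_prime(firstPrime):
--         firstPrime += 1
--
--     secondPrime = n
--     while not is_prime(secondPrime):
--         secondPrime -= 1
--
--     return firstPrime - secondPrime
-- ===== SOURCE B (Python) =====
-- def is_prime(n):
--     i = 2
--     while i * i <= n:
--         if n % i == 0:
--             return False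
--         i += 1
--     return True
--
-- def primes_difference(n):
--     if n <= 3:
--         return
--     # Bertrand's postulate: there is a prime p with n < p < 2*n, so the
--     # bounded range below always contains the next prime.
--     nxt = next(k for k in range(n + 1, 2 * n + 2) if is_prime(k))
--     prv = next(k for k in range(n, 1, -1) if is_prime(k))
--     return nxt - prv
-- ===== Notes on version B (the rewrite author's own statement) =====
-- stated objective: faster
-- what changed: Primality now trial-divides only while i*i <= n (stopping at the integer square root) instead of testing every divisor up to n-1, and the two incremental while-loop searches are replaced by selecting the first prime from explicit bounded ranges (upward range justified by Bertrand's postulate, downward range down to 2).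
import Mathlib
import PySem

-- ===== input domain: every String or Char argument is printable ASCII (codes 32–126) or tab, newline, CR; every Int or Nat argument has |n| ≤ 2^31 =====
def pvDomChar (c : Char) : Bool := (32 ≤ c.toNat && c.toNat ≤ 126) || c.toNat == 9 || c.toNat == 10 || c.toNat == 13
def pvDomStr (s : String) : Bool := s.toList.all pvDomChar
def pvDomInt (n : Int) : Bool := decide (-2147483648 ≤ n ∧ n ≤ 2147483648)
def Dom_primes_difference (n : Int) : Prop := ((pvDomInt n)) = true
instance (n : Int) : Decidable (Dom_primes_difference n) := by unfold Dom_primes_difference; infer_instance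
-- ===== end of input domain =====

-- B replaces A's full trial division (divisors up to n-1) by trial division that stops at the
-- integer square root (while i*i <= n), and replaces both incremental while-loop searches by
-- picking the first prime from explicit bounded ranges (upward bound via Bertrand's postulate).

-- ===== PORT A =====
-- for i in range(2, n): if n % i == 0: return False / return True
def pvLoopA (k : Int) : List Int → Bool
  | [] => true
  | i :: rest => if k % i == 0 then false else pvLoopA k rest

def pvIsPrimeA (k : Int) : Bool := pvLoopA k (PySem.List.pyRange 2 k 1)

-- the two Python while-loops, ported with a fuel counter (2*n+4 steps); by Bertrand's
-- postulate the fuel is ample for every n on which the Python loops run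
def pvUpA : Nat → Int → Int
  | 0, k => k
  | f+1, k => if pvIsPrimeA k then k else pvUpA f (k+1)

def pvDownA : Nat → Int → Int
  | 0, k => k
  | f+1, k => if pvIsPrimeA k then k else pvDownA f (k-1)

def primes_difference (n : Int) : Option Int :=
  if n ≤ 3 then none
  else
    let firstPrime := pvUpA (2*n+4).toNat (n+1)
    let secondPrime := pvDownA (2*n+4).toNat n
    some (firstPrime - secondPrime)

-- ===== PORT B =====
-- i = 2; while i*i <= n: if n % i == 0: return False; i += 1 / return True
def pvTrialB (k i : Int) (hi : 2 ≤ i) : Bool :=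
  if h : i * i ≤ k then
    (if k % i == 0 then false else pvTrialB k (i+1) (by omega))
  else true
termination_by (k - i).toNat
decreasing_by
  have h2 : 2 * i ≤ i * i := by nlinarith
  omega

def pvIsPrimeB (k : Int) : Bool := pvTrialB k 2 (by omega)

-- next(k for k in range(...) if is_prime(k)) = first match of the range;
-- the unreachable StopIteration (the generator exhausted) is the 'none' of find?
def primes_difference_alt (n : Int) : Option Int :=
  if n ≤ 3 then none
  else
    ((PySem.List.pyRange (n+1) (2*n+2) 1).find? pvIsPrimeB).bind fun nxt =>
      ((PySem.List.pyRange n 1 (-1)).find? pvIsPrimeB).map fun prv =>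
        nxt - prv

-- ===== PRECONDITION & SPEC =====
def Spec_primes_difference (n : Int) (out : Option Int) : Prop := out = primes_difference_alt n
instance (n : Int) (out : Option Int) : Decidable (Spec_primes_difference n out) := by unfold Spec_primes_difference; infer_instance

-- ===== CLAIM (what is proved, stated in full; the proofs are below) =====
def Claim_equal_primes_difference : Prop := ∀ (n : Int), Dom_primes_difference n → Spec_primes_difference n (primes_difference n)

-- ===== LEMMAS AND PROOFS =====

theorem pvLoopA_all (k : Int) (l : List Int) : pvLoopA k l = l.all (fun i => !(k % i == 0)) := by
  induction l with
  | nil => rfl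
  | cons i rest ih => by_cases h : k % i == 0 <;> simp [pvLoopA, h, ih]

theorem pvIsPrimeA_iff (k : Int) :
    pvIsPrimeA k = true ↔ ∀ i : Int, 2 ≤ i → i < k → ¬ i ∣ k := by
  rw [pvIsPrimeA, pvLoopA_all, List.all_eq_true]
  constructor
  · intro h i h2 hik hdvd
    have hm := h i (by rw [PySem.List.mem_pyRange_one]; exact ⟨h2, hik⟩)
    simp at hm
    exact hm hdvd
  · intro h i hi
    rw [PySem.List.mem_pyRange_one] at hi
    simp only [Bool.not_eq_true', beq_eq_false_iff_ne, ne_eq]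
    intro hz
    exact h i hi.1 hi.2 (Int.dvd_of_emod_eq_zero hz)

theorem pvTrialB_iff (k i : Int) (hi : 2 ≤ i) :
    pvTrialB k i hi = true ↔ ∀ j : Int, i ≤ j → j * j ≤ k → ¬ j ∣ k := by
  fun_induction pvTrialB k i hi with
  | case1 i hi h hz =>
    simp only [Bool.false_eq_true, false_iff]
    intro hall
    exact hall i le_rfl h (Int.dvd_of_emod_eq_zero (by simpa using hz))
  | case2 i hi h hz ih =>
    rw [ih]
    constructor
    · intro hall j hij hjk
      rcases lt_or_eq_of_le hij with hlt | heq
      · exact hall j (by omega) hjk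
      · subst heq
        exact fun hd => absurd (Int.emod_eq_zero_of_dvd hd) (by simpa using hz)
    · intro hall j hij hjk
      exact hall j (by omega) hjk
  | case3 i hi h =>
    simp only [true_iff]
    intro j hij hjk
    have : i * i ≤ j * j := by nlinarith
    omega

theorem pvIsPrimeB_iff (k : Int) :
    pvIsPrimeB k = true ↔ ∀ j : Int, 2 ≤ j → j * j ≤ k → ¬ j ∣ k :=
  pvTrialB_iff k 2 (by omega)

-- the heart: full trial division and √-bounded trial division agree (for every integer k)
theorem pvIsPrime_eq (k : Int) : pvIsPrimeA k = pvIsPrimeB k := by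
  have h : (pvIsPrimeA k = true) ↔ (pvIsPrimeB k = true) := by
    rw [pvIsPrimeA_iff, pvIsPrimeB_iff]
    constructor
    · intro h j h2 hjk hdvd
      have h2j : 2 * j ≤ j * j := by nlinarith
      exact h j h2 (by omega) hdvd
    · intro h i h2 hik hdvd
      obtain ⟨d, hd⟩ := hdvd
      have hdpos : 0 < d := by nlinarith
      have hd1 : d ≠ 1 := by intro h1; rw [h1, mul_one] at hd; omega
      have hd2 : 2 ≤ d := by omega
      by_cases hsq : i * i ≤ k
      · exact h i h2 hsq ⟨d, hd⟩
      · have hdi : d < i := by nlinarith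
        have hdd : d * d ≤ k := by nlinarith
        exact h d hd2 hdd ⟨i, by rw [hd]; ring⟩
  cases hA : pvIsPrimeA k <;> cases hB : pvIsPrimeB k <;> simp_all

-- characterisation of A's upward while-loop: it returns the first x ≥ s with pvIsPrimeA x,
-- provided x is within fuel reach
theorem pvUpA_eq (f : Nat) (s x : Int) (hsx : s ≤ x) (hfx : x < s + f)
    (hp : pvIsPrimeA x = true) (hmin : ∀ k : Int, s ≤ k → k < x → pvIsPrimeA k = false) :
    pvUpA f s = x := by
  induction f generalizing s with
  | zero => omega
  | succ f ih =>
    by_cases hs : pvIsPrimeA s = true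
    · have hxs : x = s := by
        by_contra hne
        have := hmin s le_rfl (by omega)
        simp [this] at hs
      simp [pvUpA, hs, hxs]
    · have hxs : s ≠ x := fun h => hs (h ▸ hp)
      simp only [pvUpA, hs]
      exact ih (s+1) (by omega) (by push_cast at hfx ⊢; omega)
        (fun k hk1 hk2 => hmin k (by omega) hk2)

theorem pvDownA_eq (f : Nat) (s x : Int) (hsx : x ≤ s) (hfx : s - f < x)
    (hp : pvIsPrimeA x = true) (hmin : ∀ k : Int, x < k → k ≤ s → pvIsPrimeA k = false) :
    pvDownA f s = x := by
  induction f generalizing s with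
  | zero => omega
  | succ f ih =>
    by_cases hs : pvIsPrimeA s = true
    · have hxs : x = s := by
        by_contra hne
        have := hmin s (by omega) le_rfl
        simp [this] at hs
      simp [pvDownA, hs, hxs]
    · have hxs : s ≠ x := fun h => hs (h ▸ hp)
      simp only [pvDownA, hs]
      exact ih (s-1) (by omega) (by push_cast at hfx ⊢; omega)
        (fun k hk1 hk2 => hmin k hk1 (by omega))

-- find? on an ascending range returns the first match
theorem find?_pyRange_one (a b x : Int) (p : Int → Bool) (hax : a ≤ x) (hxb : x < b)
    (hp : p x = true) (hmin : ∀ k : Int, a ≤ k → k < x → p k = false) :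
    (PySem.List.pyRange a b 1).find? p = some x := by
  have hf : ∀ m : Nat, ∀ a : Int, (b - a).toNat = m → a ≤ x →
      (∀ k : Int, a ≤ k → k < x → p k = false) →
      (PySem.List.pyRange a b 1).find? p = some x := by
    intro m
    induction m with
    | zero => intro a hm hax _; omega
    | succ m ih =>
      intro a hm hax hmin
      rw [PySem.List.pyRange_one_cons (by omega)]
      by_cases hpa : p a = true
      · have hxa : x = a := by
          by_contra hne
          have := hmin a le_rfl (by omega)
          simp [this] at hpa
        simp [List.find?, hpa, hxa]
      · simp only [List.find?, Bool.not_eq_true] at *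
        rw [hpa]
        exact ih (a+1) (by omega) (by
          rcases eq_or_lt_of_le hax with h | h
          · exact absurd (h ▸ hp) (by simp [hpa])
          · omega) (fun k hk1 hk2 => hmin k (by omega) hk2)
  exact hf (b - a).toNat a rfl hax hmin

-- find? on a descending range returns the first match from the top
theorem find?_pyRange_neg_one (a b x : Int) (p : Int → Bool) (hxa : x ≤ a) (hbx : b < x)
    (hp : p x = true) (hmin : ∀ k : Int, x < k → k ≤ a → p k = false) :
    (PySem.List.pyRange a b (-1)).find? p = some x := by
  have hf : ∀ m : Nat, ∀ a : Int, (a - b).toNat = m → x ≤ a →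
      (∀ k : Int, x < k → k ≤ a → p k = false) →
      (PySem.List.pyRange a b (-1)).find? p = some x := by
    intro m
    induction m with
    | zero => intro a hm hxa' _; omega
    | succ m ih =>
      intro a hm hxa' hmin
      rw [PySem.List.pyRange_neg_one_cons (by omega)]
      by_cases hpa : p a = true
      · have hxeq : x = a := by
          by_contra hne
          have := hmin a (by omega) le_rfl
          simp [this] at hpa
        simp [List.find?, hpa, hxeq]
      · simp only [List.find?, Bool.not_eq_true] at *
        rw [hpa]
        exact ih (a-1) (by omega) (by
          rcases eq_or_lt_of_le hxa' with h | h
          · exact absurd (h ▸ hp) (by simp [hpa])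
          · omega) (fun k hk1 hk2 => hmin k hk1 (by omega))
  exact hf (a - b).toNat a rfl hxa hmin

-- a genuine prime passes the √-bounded test
theorem pvIsPrimeB_of_prime (p : ℕ) (hp : p.Prime) : pvIsPrimeB (p : Int) = true := by
  rw [pvIsPrimeB_iff]
  intro j h2 hjk hdvd
  have hj0 : 0 < j := by omega
  have hdvd' : j.toNat ∣ p := by
    have : (j.toNat : Int) ∣ (p : Int) := by rwa [Int.toNat_of_nonneg (by omega)]
    exact_mod_cast this
  have hj2 : 2 ≤ j.toNat := by omega
  rcases (Nat.Prime.eq_one_or_self_of_dvd hp _ hdvd') with h1 | hsel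
  · omega
  · have hjp : j = (p : Int) := by omega
    have : (p : Int) * p ≤ p := by rw [← hjp] ; omega
    have hp2 : 2 ≤ (p : Int) := by exact_mod_cast hp.two_le
    nlinarith

-- existence of a prime in (n, 2n) — Bertrand's postulate
theorem pvExistsNext (n : Int) (hn : 3 < n) :
    ∃ x : Int, n < x ∧ x < 2*n ∧ pvIsPrimeB x = true := by
  obtain ⟨p, hp, hlt, hle⟩ := Nat.exists_prime_lt_and_le_two_mul n.toNat (by omega)
  refine ⟨(p : Int), by omega, ?_, pvIsPrimeB_of_prime p hp⟩
  have : p ≠ 2 * n.toNat := by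
    intro h
    rcases hp.eq_one_or_self_of_dvd 2 ⟨n.toNat, h⟩ with h1 | h1 <;> omega
  omega

theorem pvIsPrimeB_three : pvIsPrimeB 3 = true := by
  rw [pvIsPrimeB_iff]
  intro j h2 hj _
  nlinarith

-- the least x > n with pvIsPrimeB x, packaged with its bounds
theorem pvLeastNext (n : Int) (hn : 3 < n) :
    ∃ x : Int, n < x ∧ x < 2*n ∧ pvIsPrimeB x = true ∧
      ∀ k : Int, n < k → k < x → pvIsPrimeB k = false := by
  obtain ⟨x0, hx1, hx2, hx3⟩ := pvExistsNext n hn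
  have hQ : ∃ m : Nat, pvIsPrimeB (n + 1 + m) = true :=
    ⟨(x0 - (n+1)).toNat, by rwa [Int.toNat_of_nonneg (by omega), (by ring : n + 1 + (x0 - (n+1)) = x0)]⟩
  classical
  refine ⟨n + 1 + Nat.find hQ, by omega, ?_, Nat.find_spec hQ, ?_⟩
  · have : Nat.find hQ ≤ (x0 - (n+1)).toNat :=
      Nat.find_min' hQ (by rwa [Int.toNat_of_nonneg (by omega), (by ring : n + 1 + (x0 - (n+1)) = x0)])
    omega
  · intro k hk1 hk2
    have hlt : (k - (n+1)).toNat < Nat.find hQ := by omega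
    have := Nat.find_min hQ hlt
    rwa [Int.toNat_of_nonneg (by omega), (by ring : n + 1 + (k - (n+1)) = k), Bool.not_eq_true] at this

-- the greatest x ≤ n with pvIsPrimeB x (3 ≤ x since 3 is prime)
theorem pvGreatestPrev (n : Int) (hn : 3 < n) :
    ∃ x : Int, 3 ≤ x ∧ x ≤ n ∧ pvIsPrimeB x = true ∧
      ∀ k : Int, x < k → k ≤ n → pvIsPrimeB k = false := by
  have hQ : ∃ m : Nat, pvIsPrimeB (n - m) = true :=
    ⟨(n - 3).toNat, by rw [Int.toNat_of_nonneg (by omega), (by ring : n - (n - 3) = 3)]; exact pvIsPrimeB_three⟩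
  classical
  have hfind : Nat.find hQ ≤ (n - 3).toNat :=
    Nat.find_min' hQ (by rw [Int.toNat_of_nonneg (by omega), (by ring : n - (n - 3) = 3)]; exact pvIsPrimeB_three)
  refine ⟨n - Nat.find hQ, by omega, by omega, Nat.find_spec hQ, ?_⟩
  intro k hk1 hk2
  have hlt : (n - k).toNat < Nat.find hQ := by omega
  have := Nat.find_min hQ hlt
  rwa [Int.toNat_of_nonneg (by omega), (by ring : n - (n - k) = k), Bool.not_eq_true] at this

-- ===== VERDICT (by name: the statement is the Claim_ definition above) =====
theorem primes_difference_spec : Claim_equal_primes_difference := by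
  intro n _
  unfold Spec_primes_difference primes_difference primes_difference_alt
  by_cases h : n ≤ 3
  · rw [if_pos h, if_pos h]
  · rw [if_neg h, if_neg h]
    obtain ⟨u, hu1, hu2, hu3, hu4⟩ := pvLeastNext n (by omega)
    obtain ⟨v, hv1, hv2, hv3, hv4⟩ := pvGreatestPrev n (by omega)
    have hfuel : ((2*n+4).toNat : Int) = 2*n+4 := Int.toNat_of_nonneg (by omega)
    have hA1 : pvUpA (2*n+4).toNat (n+1) = u :=
      pvUpA_eq _ _ _ (by omega) (by omega) (by rw [pvIsPrime_eq]; exact hu3)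
        (fun k hk1 hk2 => by rw [pvIsPrime_eq]; exact hu4 k (by omega) hk2)
    have hA2 : pvDownA (2*n+4).toNat n = v :=
      pvDownA_eq _ _ _ (by omega) (by omega) (by rw [pvIsPrime_eq]; exact hv3)
        (fun k hk1 hk2 => by rw [pvIsPrime_eq]; exact hv4 k hk1 hk2)
    have hB1 : (PySem.List.pyRange (n+1) (2*n+2) 1).find? pvIsPrimeB = some u :=
      find?_pyRange_one _ _ _ _ (by omega) (by omega) hu3
        (fun k hk1 hk2 => hu4 k (by omega) hk2)
    have hB2 : (PySem.List.pyRange n 1 (-1)).find? pvIsPrimeB = some v :=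
      find?_pyRange_neg_one _ _ _ _ (by omega) (by omega) hv3
        (fun k hk1 hk2 => hv4 k hk1 hk2)
    simp [hA1, hA2, hB1, hB2]
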